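-- pv_equiv track=rewrite | github.com/manuel-calzadaa-laureate-mx/LaureateTools | files/CompletedProceduresFile.py | _extract_package_body_specific_object_from_source_code_data
-- ===== SOURCE A (Python) =====
-- def _extract_package_body_specific_object_from_source_code_data(source_code_lines: str, procedure_name: str):
--     """
--     Extract the source code for a specific procedure or function from the given package source.
--
--     Args:
--         source_code_lines (list): Lines of the package source code.
--         procedure_name (str): The name of the procedure or function to extract.
--
--     Returns:
--         list: Lines of the source code for the specified procedure or function.
--     """
--     in_procedure = False
--     procedure_code = []
--
--     # Normalize procedure name for matching (remove spaces, case-insensitive comparison)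
--     procedure_name = procedure_name.strip().lower()
--
--     for line in source_code_lines:
--         normalized_line = line.strip().lower()
--
--         # Check if the line contains the procedure or function definition
--         if (f"procedure {procedure_name}" in normalized_line or
--                 f"function {procedure_name}" in normalized_line):
--             in_procedure = True  # Start capturing lines
--             procedure_code.append(line)
--             continue
--
--         # Stop capturing when we reach the `END` of the procedure or function
--         if in_procedure:
--             procedure_code.append(line)
--             if normalized_line == "end;" or normalized_line.startswith(f"end {procedure_name}"):
--                 break
--
--     return procedure_code
-- ===== SOURCE B (Python) =====
-- def _extract_package_body_specific_object_from_source_code_data(source_code_lines: str, procedure_name: str):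
--     """Two-phase locate-then-collect: find the defining line first, then
--     capture lines until the terminator (a re-definition line never terminates)."""
--     name = procedure_name.strip().lower()
--
--     def is_def(line):
--         nl = line.strip().lower()
--         return f"procedure {name}" in nl or f"function {name}" in nl
--
--     def is_end(line):
--         nl = line.strip().lower()
--         return nl == "end;" or nl.startswith(f"end {name}")
--
--     idx = next((i for i, l in enumerate(source_code_lines) if is_def(l)), None)
--     if idx is None:
--         return []
--     body = []
--     for line in source_code_lines[idx + 1:]:
--         body.append(line)
--         if not is_def(line) and is_end(line):
--             break
--     return [source_code_lines[idx]] + body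
-- ===== Notes on version B (the rewrite author's own statement) =====
-- stated objective: simpler
-- what changed: Replaces the single stateful scan with an in_procedure flag by an explicit two-phase structure: locate the first defining line (next over enumerate), then collect the body from the slice after it until the terminator, keeping the rule that a re-defining line never terminates.
import Mathlib
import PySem

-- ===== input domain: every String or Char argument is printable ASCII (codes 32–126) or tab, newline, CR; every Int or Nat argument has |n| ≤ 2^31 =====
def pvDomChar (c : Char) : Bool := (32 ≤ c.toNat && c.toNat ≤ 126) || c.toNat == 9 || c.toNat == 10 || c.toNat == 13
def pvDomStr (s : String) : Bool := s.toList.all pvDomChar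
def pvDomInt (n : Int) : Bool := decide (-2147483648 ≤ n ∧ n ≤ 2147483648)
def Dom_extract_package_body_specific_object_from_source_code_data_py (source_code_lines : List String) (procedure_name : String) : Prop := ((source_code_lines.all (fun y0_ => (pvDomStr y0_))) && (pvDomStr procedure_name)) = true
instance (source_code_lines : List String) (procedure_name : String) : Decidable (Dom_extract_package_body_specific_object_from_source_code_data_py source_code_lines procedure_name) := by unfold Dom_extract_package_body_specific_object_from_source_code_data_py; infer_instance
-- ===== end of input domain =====

-- B replaces A's single stateful flag-scan by a two-phase locate-then-collect decomposition (same cost, plainer structure).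


-- ===== PORT A =====
def pvA_loop (pname : String) (inProc : Bool) (acc : List String) : List String → List String
  | [] => acc
  | line :: rest =>
    let nl := PySem.Str.lower (PySem.Str.strip line)
    if PySem.Str.isIn ("procedure " ++ pname) nl || PySem.Str.isIn ("function " ++ pname) nl then
      pvA_loop pname true (acc ++ [line]) rest
    else if inProc then
      let acc' := acc ++ [line]
      if nl == "end;" || PySem.Str.startswith nl ("end " ++ pname) then acc'
      else pvA_loop pname true acc' rest
    else pvA_loop pname inProc acc rest

def extract_package_body_specific_object_from_source_code_data_py (source_code_lines : List String) (procedure_name : String) : List String :=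
  let pname := PySem.Str.lower (PySem.Str.strip procedure_name)
  pvA_loop pname false [] source_code_lines

-- ===== PORT B =====
-- B: locate the defining line, then collect until the terminator.
def pvB_isDef (pname line : String) : Bool :=
  let nl := PySem.Str.lower (PySem.Str.strip line)
  PySem.Str.isIn ("procedure " ++ pname) nl || PySem.Str.isIn ("function " ++ pname) nl

def pvB_isEnd (pname line : String) : Bool :=
  let nl := PySem.Str.lower (PySem.Str.strip line)
  nl == "end;" || PySem.Str.startswith nl ("end " ++ pname)

-- next((i …)) + the element at idx + the slice after idx, as one structural find
def pvB_locate (pname : String) : List String → Option (String × List String)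
  | [] => none
  | l :: rest => if pvB_isDef pname l then some (l, rest) else pvB_locate pname rest

def pvB_collect (pname : String) (body : List String) : List String → List String
  | [] => body
  | l :: rest =>
    let body' := body ++ [l]
    if !pvB_isDef pname l && pvB_isEnd pname l then body' else pvB_collect pname body' rest

def extract_package_body_specific_object_from_source_code_data_py_alt (source_code_lines : List String) (procedure_name : String) : List String :=
  let pname := PySem.Str.lower (PySem.Str.strip procedure_name)
  match pvB_locate pname source_code_lines with
  | none => []
  | some (header, rest) => [header] ++ pvB_collect pname [] rest

-- ===== PRECONDITION & SPEC =====
def Spec_extract_package_body_specific_object_from_source_code_data_py (source_code_lines : List String) (procedure_name : String) (out : List String) : Prop := out = extract_package_body_specific_object_from_source_code_data_py_alt source_code_lines procedure_name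
instance (source_code_lines : List String) (procedure_name : String) (out : List String) : Decidable (Spec_extract_package_body_specific_object_from_source_code_data_py source_code_lines procedure_name out) := by unfold Spec_extract_package_body_specific_object_from_source_code_data_py; infer_instance

-- ===== CLAIM (what is proved, stated in full; the proofs are below) =====
def Claim_equal_extract_package_body_specific_object_from_source_code_data_py : Prop := ∀ (source_code_lines : List String) (procedure_name : String), Dom_extract_package_body_specific_object_from_source_code_data_py source_code_lines procedure_name → Spec_extract_package_body_specific_object_from_source_code_data_py source_code_lines procedure_name (extract_package_body_specific_object_from_source_code_data_py source_code_lines procedure_name)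

-- ===== LEMMAS AND PROOFS =====

-- A's inline tests are the bodies of B's helpers
lemma condDef_eq (pname l : String) :
    (PySem.Str.isIn ("procedure " ++ pname) (PySem.Str.lower (PySem.Str.strip l)) ||
      PySem.Str.isIn ("function " ++ pname) (PySem.Str.lower (PySem.Str.strip l))) = pvB_isDef pname l := rfl

lemma condEnd_eq (pname l : String) :
    (PySem.Str.lower (PySem.Str.strip l) == "end;" ||
      PySem.Str.startswith (PySem.Str.lower (PySem.Str.strip l)) ("end " ++ pname)) = pvB_isEnd pname l := rfl

lemma pvB_collect_acc (pname : String) (body ls : List String) :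
    pvB_collect pname body ls = body ++ pvB_collect pname [] ls := by
  induction ls generalizing body with
  | nil => simp [pvB_collect]
  | cons l rest ih =>
    simp only [pvB_collect, List.nil_append]
    by_cases h : (!pvB_isDef pname l && pvB_isEnd pname l) = true
    · rw [if_pos h, if_pos h]
    · rw [if_neg h, if_neg h, ih (body ++ [l]), ih [l], List.append_assoc]

lemma pvA_loop_true (pname : String) (acc ls : List String) :
    pvA_loop pname true acc ls = acc ++ pvB_collect pname [] ls := by
  induction ls generalizing acc with
  | nil => simp [pvA_loop, pvB_collect]
  | cons l rest ih =>
    simp only [pvA_loop, pvB_collect, condDef_eq, condEnd_eq, List.nil_append]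
    by_cases hd : pvB_isDef pname l = true
    · rw [if_pos hd, ih]
      have : (!pvB_isDef pname l && pvB_isEnd pname l) = false := by simp [hd]
      rw [if_neg (by simp [this]), pvB_collect_acc pname [l] rest, List.append_assoc]
    · rw [if_neg hd]; simp only [if_true]
      rw [Bool.not_eq_true] at hd
      by_cases he : pvB_isEnd pname l = true
      · rw [if_pos (by simp [hd, he]), if_pos (by simp [hd, he])]
      · rw [if_neg (by simp [hd, he]), if_neg (by simp [hd, he]), ih,
          pvB_collect_acc pname [l] rest, List.append_assoc]

lemma pvA_loop_false (pname : String) (acc ls : List String) :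
    pvA_loop pname false acc ls =
      acc ++ (match pvB_locate pname ls with
              | none => []
              | some (header, rest) => [header] ++ pvB_collect pname [] rest) := by
  induction ls generalizing acc with
  | nil => simp [pvA_loop, pvB_locate]
  | cons l rest ih =>
    simp only [pvA_loop, pvB_locate, condDef_eq]
    by_cases hd : pvB_isDef pname l = true
    · rw [if_pos hd, if_pos hd, pvA_loop_true]
      simp
    · rw [if_neg hd, if_neg hd]
      simp [ih]

-- ===== VERDICT (by name: the statement is the Claim_ definition above) =====
theorem extract_package_body_specific_object_from_source_code_data_py_spec : Claim_equal_extract_package_body_specific_object_from_source_code_data_py := by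
  intro source_code_lines procedure_name _
  unfold Spec_extract_package_body_specific_object_from_source_code_data_py
  unfold extract_package_body_specific_object_from_source_code_data_py
  unfold extract_package_body_specific_object_from_source_code_data_py_alt
  simpa using pvA_loop_false (PySem.Str.lower (PySem.Str.strip procedure_name)) [] source_code_lines
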